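-- pv_equiv track=rewrite | github.com/weiyangzen/awesome_algorithms | Algorithms/数学-数论-0050-素数k元组算法/demo.py | find_prime_k_tuples
-- ===== SOURCE A (Python) =====
-- from math import isqrt, log
-- from typing import Iterable, Sequence
--
-- def canonicalize_pattern(offsets: Iterable[int]) -> tuple[int, ...]:
--     """Normalize a pattern and validate basic constraints."""
--     normalized = tuple(sorted(set(int(x) for x in offsets)))
--     if not normalized:
--         raise ValueError("pattern must contain at least one offset")
--     if normalized[0] < 0:
--         raise ValueError("offsets must be non-negative")
--     if len(normalized) != len(tuple(int(x) for x in offsets)):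
--         raise ValueError("offsets must be unique")
--     return normalized
--
-- def build_prime_table(limit: int) -> bytearray:
--     """Return primality table in [0, limit] using sieve of Eratosthenes."""
--     if limit < 0:
--         raise ValueError("limit must be >= 0")
--
--     is_prime = bytearray(b"\x01") * (limit + 1)
--     if limit >= 0:
--         is_prime[0] = 0
--     if limit >= 1:
--         is_prime[1] = 0
--
--     for p in range(2, isqrt(limit) + 1):
--         if is_prime[p]:
--             start = p * p
--             step = p
--             span = ((limit - start) // step) + 1
--             is_prime[start : limit + 1 : step] = b"\x00" * span
--     return is_prime
--
-- def find_prime_k_tuples(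
--     upper_bound: int,
--     offsets: Sequence[int],
--     prime_table: Sequence[int] | None = None,
-- ) -> list[tuple[int, ...]]:
--     """Enumerate prime tuples with all values <= upper_bound."""
--     if upper_bound < 2:
--         return []
--
--     pattern = canonicalize_pattern(offsets)
--     max_offset = pattern[-1]
--
--     if prime_table is None:
--         prime_table = build_prime_table(upper_bound)
--
--     required_len = upper_bound + 1
--     if len(prime_table) < required_len:
--         raise ValueError(
--             f"prime_table length {len(prime_table)} is too short for upper_bound {upper_bound}"
--         )
--
--     results: list[tuple[int, ...]] = []
--     for base in range(2, upper_bound - max_offset + 1):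
--         ok = True
--         for d in pattern:
--             if not prime_table[base + d]:
--                 ok = False
--                 break
--         if ok:
--             results.append(tuple(base + d for d in pattern))
--     return results
-- ===== SOURCE B (Python) =====
-- from math import isqrt
-- from typing import Iterable, Sequence
--
-- def canonicalize_pattern(offsets: Iterable[int]) -> tuple[int, ...]:
--     """Normalize a pattern and validate basic constraints."""
--     normalized = tuple(sorted(set(int(x) for x in offsets)))
--     if not normalized:
--         raise ValueError("pattern must contain at least one offset")
--     if normalized[0] < 0:
--         raise ValueError("offsets must be non-negative")
--     if len(normalized) != len(tuple(int(x) for x in offsets)):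
--         raise ValueError("offsets must be unique")
--     return normalized
--
-- def build_prime_table(limit: int) -> bytearray:
--     """Return primality table in [0, limit] using sieve of Eratosthenes."""
--     if limit < 0:
--         raise ValueError("limit must be >= 0")
--     is_prime = bytearray(b"\x01") * (limit + 1)
--     if limit >= 0:
--         is_prime[0] = 0
--     if limit >= 1:
--         is_prime[1] = 0
--     for p in range(2, isqrt(limit) + 1):
--         if is_prime[p]:
--             start = p * p
--             step = p
--             span = ((limit - start) // step) + 1
--             is_prime[start : limit + 1 : step] = b"\x00" * span
--     return is_prime
--
-- def find_prime_k_tuples(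
--     upper_bound: int,
--     offsets: Sequence[int],
--     prime_table: Sequence[int] | None = None,
-- ) -> list[tuple[int, ...]]:
--     """Enumerate prime tuples with all values <= upper_bound.
--
--     Set-intersection strategy: one pass per offset over the prime positions,
--     instead of one inner loop per candidate base.
--     """
--     if upper_bound < 2:
--         return []
--
--     pattern = canonicalize_pattern(offsets)
--     max_offset = pattern[-1]
--
--     if prime_table is None:
--         prime_table = build_prime_table(upper_bound)
--
--     required_len = upper_bound + 1
--     if len(prime_table) < required_len:
--         raise ValueError(
--             f"prime_table length {len(prime_table)} is too short for upper_bound {upper_bound}"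
--         )
--
--     primes = [q for q in range(len(prime_table)) if prime_table[q]]
--     bases = set(range(2, upper_bound - max_offset + 1))
--     for d in pattern:
--         bases &= {q - d for q in primes}
--     return [tuple(b + d for d in pattern) for b in sorted(bases)]
-- ===== Notes on version B (the rewrite author's own statement) =====
-- stated objective: alternative
-- what changed: Replaces the per-base inner offset loop with a set-intersection sweep: build the list of prime positions once, intersect the candidate-base set with the d-shifted prime set once per offset, then emit tuples from the sorted surviving bases.
import Mathlib
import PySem

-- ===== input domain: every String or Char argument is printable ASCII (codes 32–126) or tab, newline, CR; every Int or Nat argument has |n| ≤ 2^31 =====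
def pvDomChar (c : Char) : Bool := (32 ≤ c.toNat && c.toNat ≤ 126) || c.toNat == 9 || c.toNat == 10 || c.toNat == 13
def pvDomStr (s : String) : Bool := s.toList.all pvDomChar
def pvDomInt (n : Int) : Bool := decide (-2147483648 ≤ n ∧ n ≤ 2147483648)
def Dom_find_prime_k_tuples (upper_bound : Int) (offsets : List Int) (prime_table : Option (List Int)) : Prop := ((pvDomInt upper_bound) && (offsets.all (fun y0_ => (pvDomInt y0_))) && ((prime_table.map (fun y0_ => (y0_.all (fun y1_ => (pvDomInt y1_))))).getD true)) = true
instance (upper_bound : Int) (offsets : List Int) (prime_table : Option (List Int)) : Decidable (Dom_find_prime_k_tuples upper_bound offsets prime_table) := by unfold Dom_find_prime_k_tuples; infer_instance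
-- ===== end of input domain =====

-- B replaces A's per-base inner offset loop by one set-intersection pass per offset over the
-- prime positions (then sorts the surviving bases); same cost class, alternative algorithm.

-- ===== PORT A =====
-- module-level helper `canonicalize_pattern` (shared by both Pythons):
-- normalized = tuple(sorted(set(offsets)))   (offsets are ints, so int(x) is the identity)
def pvCanon (offsets : List Int) : List Int :=
  PySem.List.sorted (PySem.Set.ofList offsets) (fun x => x) false

-- the three `raise ValueError` guards of canonicalize_pattern, as a Bool (True = no raise);
-- inputs on which it is false raise in Python and are outside Pre_.
def pvCanonOk (offsets : List Int) : Bool :=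
  let normalized := pvCanon offsets
  !normalized.isEmpty && !(PySem.List.pyGetD normalized 0 0 < 0) &&
    (normalized.length == offsets.length)

-- hand-port of the slice assignment `is_prime[start : limit+1 : step] = b"\x00" * span`:
-- zeroes exactly the indices start, start+step, … (span reaches limit); exact because
-- span = ((limit-start)//step)+1 covers every such index ≤ limit.
def pvSliceZero (t : List Int) (start step : Nat) : List Int :=
  t.mapIdx (fun i v => if start ≤ i && (i - start) % step == 0 then 0 else v)

-- module-level helper `build_prime_table` (shared; only ever called with limit = upper_bound ≥ 2,
-- so the limit < 0 raise and the limit ≥ 0 / ≥ 1 guards are all settled)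
def pvSieve (limit : Int) : List Int :=
  let n := limit.toNat
  let t0 := ((List.replicate (n + 1) (1 : Int)).set 0 0).set 1 0
  (PySem.List.pyRange 2 ((Nat.sqrt n : Int) + 1) 1).foldl
    (fun t p => if PySem.List.pyGetD t p 0 ≠ 0 then pvSliceZero t (p * p).toNat p.toNat else t) t0

-- A's inner `for d in pattern: if not prime_table[base+d]: ok=False; break`
def pvAllPrime (table : List Int) (base : Int) : List Int → Bool
  | [] => true
  | d :: ds => if PySem.List.pyGetD table (base + d) 0 ≠ 0 then pvAllPrime table base ds else false

def find_prime_k_tuples (upper_bound : Int) (offsets : List Int) (prime_table : Option (List Int)) : List (List Int) :=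
  if upper_bound < 2 then []
  else if !pvCanonOk offsets then []  -- ValueError in Python; outside Pre_
  else
    let pattern := pvCanon offsets
    let max_offset := PySem.List.pyGetD pattern (-1) 0
    let table := match prime_table with | none => pvSieve upper_bound | some t => t
    if (table.length : Int) < upper_bound + 1 then []  -- ValueError in Python; outside Pre_
    else
      (PySem.List.pyRange 2 (upper_bound - max_offset + 1) 1).foldl
        (fun results base =>
          if pvAllPrime table base pattern then results ++ [pattern.map (fun d => base + d)]
          else results) []

-- ===== PORT B =====
def find_prime_k_tuples_alt (upper_bound : Int) (offsets : List Int) (prime_table : Option (List Int)) : List (List Int) :=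
  if upper_bound < 2 then []
  else if !pvCanonOk offsets then []  -- ValueError in Python; outside Pre_
  else
    let pattern := pvCanon offsets
    let max_offset := PySem.List.pyGetD pattern (-1) 0
    let table := match prime_table with | none => pvSieve upper_bound | some t => t
    if (table.length : Int) < upper_bound + 1 then []  -- ValueError in Python; outside Pre_
    else
      let primes := (PySem.List.pyRange 0 (table.length : Int) 1).filter
        (fun q => decide (PySem.List.pyGetD table q 0 ≠ 0))
      let bases := pattern.foldl
        (fun bs d => PySem.Set.inter bs (PySem.Set.ofList (primes.map (fun q => q - d))))
        (PySem.Set.ofList (PySem.List.pyRange 2 (upper_bound - max_offset + 1) 1))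
      (PySem.List.sorted bases (fun x => x) false).map (fun b => pattern.map (fun d => b + d))

-- ===== PRECONDITION & SPEC =====
-- Pre_ excludes exactly the inputs where A raises ValueError (reached only when upper_bound ≥ 2):
-- an empty pattern, a negative offset, duplicate offsets, or an explicit prime_table shorter than
-- upper_bound + 1.
def Pre_find_prime_k_tuples (upper_bound : Int) (offsets : List Int) (prime_table : Option (List Int)) : Prop :=
  upper_bound < 2 ∨
    (offsets ≠ [] ∧ (∀ x ∈ offsets, 0 ≤ x) ∧ offsets.Nodup ∧
      prime_table.all (fun t => decide (upper_bound + 1 ≤ (t.length : Int))) = true)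
instance (upper_bound : Int) (offsets : List Int) (prime_table : Option (List Int)) : Decidable (Pre_find_prime_k_tuples upper_bound offsets prime_table) := by unfold Pre_find_prime_k_tuples; infer_instance

def pvWitness_find_prime_k_tuples : Int × List Int × Option (List Int) := (20, [0, 2], none)

def Spec_find_prime_k_tuples (upper_bound : Int) (offsets : List Int) (prime_table : Option (List Int)) (out : List (List Int)) : Prop := out = find_prime_k_tuples_alt upper_bound offsets prime_table
instance (upper_bound : Int) (offsets : List Int) (prime_table : Option (List Int)) (out : List (List Int)) : Decidable (Spec_find_prime_k_tuples upper_bound offsets prime_table out) := by unfold Spec_find_prime_k_tuples; infer_instance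

-- ===== CLAIM (what is proved, stated in full; the proofs are below) =====
def Claim_equal_find_prime_k_tuples : Prop := ∀ (upper_bound : Int) (offsets : List Int) (prime_table : Option (List Int)), Dom_find_prime_k_tuples upper_bound offsets prime_table → Pre_find_prime_k_tuples upper_bound offsets prime_table → Spec_find_prime_k_tuples upper_bound offsets prime_table (find_prime_k_tuples upper_bound offsets prime_table)

-- ===== LEMMAS AND PROOFS =====

-- A's break-loop over the pattern is List.all of the primality test
theorem pvAllPrime_eq_all (t : List Int) (b : Int) (l : List Int) :
    pvAllPrime t b l = l.all (fun d => decide (PySem.List.pyGetD t (b + d) 0 ≠ 0)) := by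
  induction l with
  | nil => rfl
  | cons d ds ih =>
    simp only [pvAllPrime, List.all_cons, ih]
    split_ifs with h <;> simp [h]

-- pointwise-equal Bool predicates give the same List.all
theorem all_congr_mem (l : List Int) (p q : Int → Bool) (h : ∀ a ∈ l, p a = q a) :
    l.all p = l.all q := by
  induction l with
  | nil => rfl
  | cons a l ih =>
    simp only [List.all_cons, h a (by simp), ih (fun x hx => h x (by simp [hx]))]

-- B's chain of set intersections is one filter by "all shifted positions are prime"
theorem foldl_inter_eq_filter (primes : List Int) (P : List Int) (bs : List Int) :
    P.foldl (fun bs d => PySem.Set.inter bs (PySem.Set.ofList (primes.map (fun q => q - d)))) bs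
      = bs.filter (fun b => P.all (fun d => decide ((b + d) ∈ primes))) := by
  induction P generalizing bs with
  | nil => simp
  | cons d P ih =>
    simp only [List.foldl_cons, ih]
    have hrw : PySem.Set.inter bs (PySem.Set.ofList (primes.map (fun q => q - d)))
        = bs.filter (fun x => (PySem.Set.ofList (primes.map (fun q => q - d))).contains x) := rfl
    rw [hrw, List.filter_filter]
    apply List.filter_congr
    intro b _
    have hiff : ((PySem.Set.ofList (primes.map (fun q => q - d))).contains b = true)
        ↔ ((b + d) ∈ primes) := by
      rw [PySem.Set.contains_iff, PySem.Set.mem_ofList, List.mem_map]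
      constructor
      · rintro ⟨q, hq, rfl⟩
        simpa using hq
      · intro h
        exact ⟨b + d, h, by ring⟩
    have hc : (PySem.Set.ofList (primes.map (fun q => q - d))).contains b
        = decide ((b + d) ∈ primes) := by
      by_cases h : (b + d) ∈ primes
      · rw [hiff.mpr h]
        simp [h]
      · have hf : (PySem.Set.ofList (primes.map (fun q => q - d))).contains b = false := by
          rcases Bool.eq_false_or_eq_true
            ((PySem.Set.ofList (primes.map (fun q => q - d))).contains b) with hh | hh
          · exact absurd (hiff.mp hh) h
          · exact hh
        rw [hf]
        simp [h]
    rw [List.all_cons, hc]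
    exact Bool.and_comm _ _

theorem pvSliceZero_length (t : List Int) (s st : Nat) : (pvSliceZero t s st).length = t.length := by
  simp [pvSliceZero]

-- the sieve's marking loop never changes the table's length
theorem pvSieve_foldl_length (l : List Int) (t : List Int) :
    (l.foldl (fun t p => if PySem.List.pyGetD t p 0 ≠ 0
        then pvSliceZero t (p * p).toNat p.toNat else t) t).length = t.length := by
  induction l generalizing t with
  | nil => rfl
  | cons p l ih =>
    simp only [List.foldl_cons]
    rw [ih]
    split_ifs with h
    · rw [pvSliceZero_length]
    · rfl

theorem pvSieve_length (limit : Int) : (pvSieve limit).length = limit.toNat + 1 := by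
  unfold pvSieve
  rw [pvSieve_foldl_length]
  simp

-- every element of a strictly increasing list is at most its last element
theorem le_getLast_of_pairwise_lt (l : List Int) (h : l.Pairwise (· < ·)) (hne : l ≠ [])
    (d : Int) (hd : d ∈ l) : d ≤ l.getLast hne := by
  induction l with
  | nil => cases hne rfl
  | cons a l ih =>
    rcases List.eq_nil_or_concat l with hl | _
    · subst hl; simp at hd; simp [hd]
    · have hlne : l ≠ [] := by rintro rfl; simp_all
      rw [List.getLast_cons hlne]
      rcases List.mem_cons.mp hd with rfl | hd'
      · exact le_of_lt ((List.pairwise_cons.mp h).1 _ (List.getLast_mem hlne))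
      · exact ih (List.pairwise_cons.mp h).2 hlne hd'

-- ===== VERDICT (by name: the statement is the Claim_ definition above) =====
theorem find_prime_k_tuples_spec : Claim_equal_find_prime_k_tuples := by
  intro ub offs pt _ hpre
  unfold Spec_find_prime_k_tuples
  by_cases hub : ub < 2
  · simp [find_prime_k_tuples, find_prime_k_tuples_alt, hub]
  rcases hpre with h | ⟨hne, hnn, hnd, hlenp⟩
  · exact absurd h hub
  -- pattern facts
  set P := pvCanon offs with hPdef
  have hPpair : P.Pairwise (· < ·) := PySem.List.sorted_ofList_pairwise_lt offs
  have hmemP : ∀ d, d ∈ P → d ∈ offs := by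
    intro d hd
    rw [hPdef, pvCanon, PySem.List.mem_sorted, PySem.Set.mem_ofList] at hd
    exact hd
  have hPne : P ≠ [] := by
    rcases List.exists_mem_of_ne_nil offs hne with ⟨x, hx⟩
    intro h0
    rw [hPdef, pvCanon, PySem.List.sorted_eq_nil_iff] at h0
    have := (PySem.Set.mem_ofList offs x).mpr hx
    rw [h0] at this
    simp at this
  have hPnn : ∀ d ∈ P, 0 ≤ d := fun d hd => hnn d (hmemP d hd)
  have hok : pvCanonOk offs = true := by
    have hlenP : P.length = offs.length := by
      rw [hPdef, pvCanon, PySem.List.length_sorted, PySem.Set.ofList_eq_self_of_nodup offs hnd]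
    have hhead : ¬ (PySem.List.pyGetD P 0 0 < 0) := by
      rcases hP0 : P with _ | ⟨h0, rest⟩
      · cases hPne hP0
      · rw [PySem.List.pyGetD_zero_cons]
        have := hPnn h0 (by rw [hP0]; simp)
        omega
    simp only [pvCanonOk, ← hPdef]
    simp [hPne, hlenP, hhead]
  -- the shared table and its length
  set table := (match pt with | none => pvSieve ub | some t => t) with htbl
  have hlen : ub + 1 ≤ (table.length : Int) := by
    rcases pt with _ | t
    · rw [htbl]
      simp only [pvSieve_length]
      have : (ub.toNat : Int) = ub := Int.toNat_of_nonneg (by omega)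
      push_cast
      omega
    · rw [htbl]
      simpa using hlenp
  have hM : PySem.List.pyGetD P (-1) 0 = P.getLast hPne := PySem.List.pyGetD_neg_one P 0 hPne
  set M := P.getLast hPne with hMdef
  have hdM : ∀ d ∈ P, d ≤ M := fun d hd => le_getLast_of_pairwise_lt P hPpair hPne d hd
  -- unfold both ports past the shared guards
  unfold find_prime_k_tuples find_prime_k_tuples_alt
  simp only [if_neg hub, hok, Bool.not_true, Bool.false_eq_true, if_false, ← hPdef, ← htbl, hM,
    if_neg (by omega : ¬ ((table.length : Int) < ub + 1))]
  -- A's side: loop-with-append = map over filter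
  rw [PySem.List.foldl_append_if (fun base => pvAllPrime table base P)
    (fun base => P.map (fun d => base + d)) (PySem.List.pyRange 2 (ub - M + 1) 1) []]
  simp only [List.nil_append]
  -- B's side
  set primes := (PySem.List.pyRange 0 (table.length : Int) 1).filter
    (fun q => decide (PySem.List.pyGetD table q 0 ≠ 0)) with hprimes
  rw [PySem.Set.ofList_eq_self_of_nodup _ (PySem.List.nodup_pyRange_one 2 (ub - M + 1)),
    foldl_inter_eq_filter]
  -- the sorted of an already strictly increasing list is itself
  have hfpair : ((PySem.List.pyRange 2 (ub - M + 1) 1).filter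
      (fun b => P.all (fun d => decide ((b + d) ∈ primes)))).Pairwise (fun a b => a ≤ b) := by
    exact ((PySem.List.pairwise_lt_pyRange_one 2 (ub - M + 1)).filter _).imp le_of_lt
  rw [PySem.List.sorted_eq_self_of_pairwise _ _ hfpair]
  -- pointwise agreement of the two filters on the base range
  have hfilter : (PySem.List.pyRange 2 (ub - M + 1) 1).filter (fun base => pvAllPrime table base P)
      = (PySem.List.pyRange 2 (ub - M + 1) 1).filter
        (fun b => P.all (fun d => decide ((b + d) ∈ primes))) := by
    apply List.filter_congr
    intro b hb
    rw [PySem.List.mem_pyRange_one] at hb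
    rw [pvAllPrime_eq_all]
    apply all_congr_mem
    intro d hd
    have hd0 : 0 ≤ d := hPnn d hd
    have hdle : d ≤ M := hdM d hd
    have hmem : (b + d) ∈ primes ↔ PySem.List.pyGetD table (b + d) 0 ≠ 0 := by
      rw [hprimes, List.mem_filter, PySem.List.mem_pyRange_one]
      constructor
      · intro ⟨_, hx⟩
        simpa using hx
      · intro hx
        exact ⟨⟨by omega, by omega⟩, by simpa using hx⟩
    by_cases hx : PySem.List.pyGetD table (b + d) 0 ≠ 0
    · simp [hx, hmem.mpr hx]
    · have : ¬ (b + d) ∈ primes := fun hm => hx (hmem.mp hm)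
      simp [hx, this]
  rw [hfilter]
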